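-- pv_equiv track=rewrite | github.com/c3er/txttrans | xmllib/__init__.py | _contentarea
-- ===== SOURCE A (Python) =====
-- def _contentarea(lines):
--     startpos = 0
--     endpos = len(lines)
--     for i, line in enumerate(lines):
--         if line.strip():
--             startpos = i
--             break
--     for i, line in reversed(list(enumerate(lines))):
--         if line.strip():
--             endpos = i + 1
--             break
--     return startpos, endpos
-- ===== SOURCE B (Python) =====
-- def _contentarea(lines):
--     first = None
--     last = None
--     for i, line in enumerate(lines):
--         if line.strip():
--             if first is None:
--                 first = i
--             last = i
--     if first is None:
--         return 0, len(lines)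
--     return first, last + 1
-- ===== Notes on version B (the rewrite author's own statement) =====
-- stated objective: simpler
-- what changed: Replaces A's two scans (a forward break-scan plus a scan over reversed(list(enumerate(lines)))) with one forward pass that tracks both the first and the last non-blank index, avoiding the materialised reversed copy.
import Mathlib
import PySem

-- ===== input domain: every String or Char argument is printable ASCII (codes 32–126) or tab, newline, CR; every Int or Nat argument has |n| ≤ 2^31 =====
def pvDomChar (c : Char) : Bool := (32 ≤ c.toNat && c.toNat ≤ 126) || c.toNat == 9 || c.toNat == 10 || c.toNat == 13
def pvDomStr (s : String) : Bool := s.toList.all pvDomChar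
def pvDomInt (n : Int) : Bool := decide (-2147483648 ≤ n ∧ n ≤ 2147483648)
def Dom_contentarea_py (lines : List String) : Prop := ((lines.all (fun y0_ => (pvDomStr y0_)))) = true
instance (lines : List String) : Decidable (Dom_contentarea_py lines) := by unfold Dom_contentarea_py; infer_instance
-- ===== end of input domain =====

-- B replaces A's two scans (forward break-scan + scan of the reversed enumerate list) with one
-- forward pass tracking both boundary indices; same O(n) cost, simpler single-pass decomposition.

-- ===== PORT A =====
-- first loop: 'for i, line in enumerate(lines): if line.strip(): startpos = i; break' (startpos starts at 0)
def pvAFirst : List (Int × String) → Int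
  | [] => 0
  | (i, line) :: rest => if PySem.Str.strip line ≠ "" then i else pvAFirst rest

-- second loop: 'for i, line in reversed(list(enumerate(lines))): if line.strip(): endpos = i + 1; break'
-- (endpos starts at len(lines), passed in as d; the caller passes the already-reversed list)
def pvALast (d : Int) : List (Int × String) → Int
  | [] => d
  | (i, line) :: rest => if PySem.Str.strip line ≠ "" then i + 1 else pvALast d rest

def contentarea_py (lines : List String) : Int × Int :=
  let startpos := pvAFirst (PySem.List.enumerate lines)
  let endpos := pvALast (lines.length : Int) (PySem.List.enumerate lines).reverse
  (startpos, endpos)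

-- ===== PORT B =====
-- loop body of Source B: update (first, last) on a non-blank line
def pvBStep (acc : Option Int × Option Int) (p : Int × String) : Option Int × Option Int :=
  if PySem.Str.strip p.2 ≠ "" then
    ((match acc.1 with | none => some p.1 | some f => some f), some p.1)
  else acc

def contentarea_py_alt (lines : List String) : Int × Int :=
  let st := (PySem.List.enumerate lines).foldl pvBStep (none, none)
  match st with
  | (none, _) => (0, (lines.length : Int))
  | (some f, l?) => (f, l?.getD f + 1)

-- ===== PRECONDITION & SPEC =====
def Spec_contentarea_py (lines : List String) (out : Int × Int) : Prop := out = contentarea_py_alt lines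
instance (lines : List String) (out : Int × Int) : Decidable (Spec_contentarea_py lines out) := by unfold Spec_contentarea_py; infer_instance

-- ===== CLAIM (what is proved, stated in full; the proofs are below) =====
def Claim_equal_contentarea_py : Prop := ∀ (lines : List String), Dom_contentarea_py lines → Spec_contentarea_py lines (contentarea_py lines)

-- ===== LEMMAS AND PROOFS =====

-- the 'last' component alone: fold that keeps the most recent non-blank index
def pvLastNB (b : Option Int) : List (Int × String) → Option Int
  | [] => b
  | p :: rest => pvLastNB (if PySem.Str.strip p.2 ≠ "" then some p.1 else b) rest

theorem pvBStep_some (f : Int) (b : Option Int) (e : List (Int × String)) :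
    e.foldl pvBStep (some f, b) = (some f, pvLastNB b e) := by
  induction e generalizing b with
  | nil => rfl
  | cons p t ih =>
      simp only [List.foldl, pvBStep, pvLastNB]
      split_ifs <;> simp [ih]

theorem pvLastNB_or (b : Option Int) (e : List (Int × String)) :
    pvLastNB b e = (pvLastNB none e).or b := by
  induction e generalizing b with
  | nil => rfl
  | cons p t ih =>
      simp only [pvLastNB]
      split_ifs with h
      · rw [ih (some p.1)]; cases pvLastNB none t <;> rfl
      · exact ih b

theorem pvALast_append (d : Int) (u v : List (Int × String)) :
    pvALast d (u ++ v) = pvALast (pvALast d v) u := by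
  induction u with
  | nil => rfl
  | cons p t ih => simp only [List.cons_append, pvALast]; split_ifs <;> simp [ih]

theorem pvALast_reverse (d : Int) (e : List (Int × String)) :
    pvALast d e.reverse = (match pvLastNB none e with
                           | some j => j + 1
                           | none => d) := by
  induction e generalizing d with
  | nil => rfl
  | cons p t ih =>
      simp only [List.reverse_cons, pvALast_append, pvLastNB]
      rw [pvLastNB_or]
      cases hgt : pvLastNB none t with
      | some j => simp only [Option.or] ; rw [ih] ; rw [hgt]
      | none =>
          simp only [Option.or]
          split_ifs with h
          · rw [ih, hgt]; simp [pvALast, h]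
          · rw [ih, hgt]; simp [pvALast, h]

theorem pv_main (e : List (Int × String)) (d : Int) :
    (pvAFirst e, pvALast d e.reverse) =
      (match e.foldl pvBStep (none, none) with
       | (none, _) => (0, d)
       | (some f, l?) => (f, l?.getD f + 1)) := by
  induction e generalizing d with
  | nil => rfl
  | cons p t ih =>
      by_cases h : PySem.Str.strip p.2 ≠ ""
      · simp only [List.foldl, pvBStep, if_pos h]
        rw [pvBStep_some]
        simp only [pvAFirst, if_pos h, List.reverse_cons, pvALast_append]
        have hx : pvALast d [p] = p.1 + 1 := by simp [pvALast, h]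
        rw [hx, pvALast_reverse]
        rw [pvLastNB_or (some p.1) t]
        cases hgt : pvLastNB none t with
        | some j => simp [Option.or]
        | none => simp [Option.or]
      · simp only [List.foldl, pvBStep, if_neg h]
        simp only [pvAFirst, if_neg h, List.reverse_cons, pvALast_append]
        have hx : pvALast d [p] = d := by simp [pvALast, h]
        rw [hx]
        exact ih d

-- ===== VERDICT (by name: the statement is the Claim_ definition above) =====
theorem contentarea_py_spec : Claim_equal_contentarea_py := by
  intro lines _
  unfold Spec_contentarea_py contentarea_py contentarea_py_alt
  exact pv_main (PySem.List.enumerate lines) (lines.length : Int)
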